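-- pv_equiv track=rewrite | github.com/sschrock04/Phonword | phonword_python3.py | segmentWord
-- ===== SOURCE A (Python) =====
-- def segmentWord(word, lexicon):
--     '''
--     Searches the lexicon (a list of strings) for words that form part of the given
--     word, and returns a list of all such possible decompositions of the word.
--     '''
--     segs = [[word]]
--     if len(word) < 3: return segs
--
--     for i in range(len(word)-2):
--         for j in range(2, len(word)-i):
--             if word[i:i+j] in lexicon:
--                 suffixes = segmentWord(word[i+j:], lexicon)
--                 for suffix in suffixes:
--                     if i > 0: toAdd = [word[:i], word[i:i+j]]
--                     else: toAdd = [word[i:i+j]]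
--                     toAdd.extend(suffix)
--                     segs.append(toAdd)
--
--     i = 0
--     while i < len(segs):
--         if segs[i] in segs[(i+1):]:
--             del segs[i]
--         else:
--             i += 1
--
--     return segs
-- ===== SOURCE B (Python) =====
-- def segmentWord(word, lexicon):
--     '''
--     Bottom-up DP over suffix start positions: a table with one decomposition list
--     per suffix of the word, filled right to left.
--     '''
--     n = len(word)
--     lex = set(lexicon)
--     res = [None] * (n + 1)
--     for k in range(n, -1, -1):
--         L = n - k
--         segs = [[word[k:]]]
--         if L >= 3:
--             for i in range(L - 2):
--                 for j in range(2, L - i):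
--                     if word[k+i:k+i+j] in lex:
--                         for suffix in res[k+i+j]:
--                             head = [word[k:k+i]] if i > 0 else []
--                             segs.append(head + [word[k+i:k+i+j]] + suffix)
--             # keep the LAST occurrence of each segmentation (one backward pass)
--             seen = set()
--             out = []
--             for s in reversed(segs):
--                 t = tuple(s)
--                 if t not in seen:
--                     seen.add(t)
--                     out.append(s)
--             out.reverse()
--             segs = out
--         res[k] = segs
--     return res[0]
-- ===== Notes on version B (the rewrite author's own statement) =====
-- stated objective: alternative
-- what changed: Top-down recursion over suffix strings replaced by a bottom-up DP table indexed by suffix start position (each suffix's decomposition list is computed once and reused), and the quadratic while/del duplicate-removal replaced by a single backward pass with a seen-set keeping the last occurrence.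
import Mathlib
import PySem

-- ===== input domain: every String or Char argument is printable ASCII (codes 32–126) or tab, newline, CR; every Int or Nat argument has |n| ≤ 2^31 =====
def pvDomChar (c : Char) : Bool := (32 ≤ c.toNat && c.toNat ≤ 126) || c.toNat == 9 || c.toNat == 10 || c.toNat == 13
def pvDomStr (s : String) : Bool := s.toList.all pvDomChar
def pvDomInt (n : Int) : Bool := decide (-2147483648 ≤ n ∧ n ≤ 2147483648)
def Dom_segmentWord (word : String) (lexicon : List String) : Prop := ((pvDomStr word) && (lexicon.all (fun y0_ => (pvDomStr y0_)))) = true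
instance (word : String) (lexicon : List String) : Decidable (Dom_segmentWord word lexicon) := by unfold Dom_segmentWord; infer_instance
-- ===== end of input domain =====

-- B re-implements A as a bottom-up DP over suffix start positions (a table of decomposition lists,
-- one per suffix, filled right to left) with a one-pass backward dedup; return values identical.

-- ===== PORT A =====
-- the while/del duplicate-removal loop of A: segs[i] is deleted iff it occurs again in segs[(i+1):]
def pvDedupA {α : Type} [DecidableEq α] : List α → List α
  | [] => []
  | x :: xs => if x ∈ xs then pvDedupA xs else x :: pvDedupA xs

-- A's recursion, on the word as List Char; fuel (≥ word length at every call — the recursion always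
-- shortens the word by ≥ 2) only makes the structural recursion visible to Lean, it never changes the value
def pvSegA (lex : List (List Char)) : Nat → List Char → List (List (List Char))
  | fuel, w =>
    if w.length < 3 then [[w]]
    else
      match fuel with
      | 0 => [[w]]   -- unreachable when fuel ≥ w.length (totality guard only)
      | f + 1 =>
        pvDedupA ((PySem.List.pyRange 0 ((w.length : Int) - 2) 1).foldl (fun segs1 i =>
          (PySem.List.pyRange 2 ((w.length : Int) - i) 1).foldl (fun segs2 j =>
            if PySem.List.slice w (some i) (some (i + j)) ∈ lex then
              (pvSegA lex f (PySem.List.slice w (some (i + j)) none)).foldl (fun segs3 suffix =>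
                segs3 ++ [(if 0 < i then
                             [PySem.List.slice w none (some i), PySem.List.slice w (some i) (some (i + j))]
                           else
                             [PySem.List.slice w (some i) (some (i + j))]) ++ suffix]) segs2
            else segs2) segs1) [[w]])

def segmentWord (word : String) (lexicon : List String) : List (List String) :=
  (pvSegA (lexicon.map String.toList) word.toList.length word.toList).map
    (fun seg => seg.map (fun p => String.ofList p))

-- ===== PORT B =====
-- B's backward pass: keep the LAST occurrence of each segmentation (seen-set over reversed list, then reverse)
def pvDedupB {α : Type} [BEq α] (l : List α) : List α :=
  ((l.reverse.foldl (fun st s =>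
      if PySem.Set.contains st.2 s then st else (st.1 ++ [s], PySem.Set.add st.2 s))
    (([] : List α), (PySem.Set.empty : PySem.Set α))).1).reverse

-- one iteration of B's main loop: fill res[k] from the already-computed entries res[k+i+j]
def pvStepB (w : List Char) (lex : PySem.Set (List Char))
    (res : List (List (List (List Char)))) (k : Int) : List (List (List (List Char))) :=
  let L : Int := (w.length : Int) - k
  let segs := [[PySem.List.slice w (some k) none]]
  let segs := if 3 ≤ L then
      pvDedupB ((PySem.List.pyRange 0 (L - 2) 1).foldl (fun segs1 i =>
        (PySem.List.pyRange 2 (L - i) 1).foldl (fun segs2 j =>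
          if PySem.Set.contains lex (PySem.List.slice w (some (k + i)) (some (k + i + j))) then
            (PySem.List.pyGetD res (k + i + j) []).foldl (fun segs3 suffix =>
              segs3 ++ [(if 0 < i then [PySem.List.slice w (some k) (some (k + i))] else []) ++
                        [PySem.List.slice w (some (k + i)) (some (k + i + j))] ++ suffix]) segs2
          else segs2) segs1) segs)
    else segs
  PySem.List.pySetD res k segs

def pvSegB (w : List Char) (lex : PySem.Set (List Char)) : List (List (List Char)) :=
  let n := w.length
  let res : List (List (List (List Char))) := List.replicate (n + 1) []
  let res := (PySem.List.pyRange (n : Int) (-1) (-1)).foldl (pvStepB w lex) res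
  PySem.List.pyGetD res 0 []

def segmentWord_alt (word : String) (lexicon : List String) : List (List String) :=
  (pvSegB word.toList (PySem.Set.ofList (lexicon.map String.toList))).map
    (fun seg => seg.map (fun p => String.ofList p))

-- ===== PRECONDITION & SPEC =====
def Spec_segmentWord (word : String) (lexicon : List String) (out : List (List String)) : Prop := out = segmentWord_alt word lexicon
instance (word : String) (lexicon : List String) (out : List (List String)) : Decidable (Spec_segmentWord word lexicon out) := by unfold Spec_segmentWord; infer_instance

-- ===== CLAIM (what is proved, stated in full; the proofs are below) =====
def Claim_equal_segmentWord : Prop := ∀ (word : String) (lexicon : List String), Dom_segmentWord word lexicon → Spec_segmentWord word lexicon (segmentWord word lexicon)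

-- ===== LEMMAS AND PROOFS =====

-- proof-side helpers: a reference form of each dedup pass
def pvDed2 {α : Type} [DecidableEq α] : List α → List α → List α
  | [], _ => []
  | x :: xs, seen => if x ∈ xs ∨ x ∈ seen then pvDed2 xs seen else x :: pvDed2 xs seen

def pvFirsts {α : Type} [DecidableEq α] : List α → List α → List α
  | [], _ => []
  | x :: xs, seen => if x ∈ seen then pvFirsts xs seen else x :: pvFirsts xs (seen ++ [x])

theorem pvFirsts_go {α : Type} [DecidableEq α] [BEq α] [LawfulBEq α] :
    ∀ (r out seen : List α),
    (r.foldl (fun st s => if PySem.Set.contains st.2 s then st else (st.1 ++ [s], PySem.Set.add st.2 s))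
      (out, seen)) =
      (out ++ pvFirsts r seen, seen ++ pvFirsts r seen) := by
  intro r
  induction r with
  | nil => intro out seen; simp [pvFirsts]
  | cons x xs ih =>
    intro out seen
    by_cases hx : x ∈ seen
    · simp only [List.foldl_cons, pvFirsts, hx, if_true]
      rw [if_pos (by simpa [PySem.Set.contains_iff] using hx)]
      exact ih out seen
    · simp only [List.foldl_cons, pvFirsts, hx, if_false]
      rw [if_neg (by simpa [PySem.Set.contains_iff] using hx)]
      have hadd : PySem.Set.add seen x = seen ++ [x] := by simp [PySem.Set.add, hx]
      rw [hadd, ih (out ++ [x]) (seen ++ [x])]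
      simp

theorem pvDed2_append {α : Type} [DecidableEq α] :
    ∀ (m : List α) (x : α) (seen : List α),
    pvDed2 (m ++ [x]) seen =
      if x ∈ seen then pvDed2 m seen else pvDed2 m (seen ++ [x]) ++ [x] := by
  intro m x
  induction m with
  | nil => intro seen; by_cases hx : x ∈ seen <;> simp [pvDed2, hx]
  | cons y ys ih =>
    intro seen
    by_cases hx : x ∈ seen
    · simp only [List.cons_append, pvDed2, ih, hx, if_true, List.mem_append, List.mem_singleton]
      split_ifs <;> simp_all
    · simp only [List.cons_append, pvDed2, ih, hx, if_false, List.mem_append, List.mem_singleton]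
      split_ifs <;> simp_all

theorem pvFirsts_rev {α : Type} [DecidableEq α] :
    ∀ (r seen : List α), (pvFirsts r seen).reverse = pvDed2 r.reverse seen := by
  intro r
  induction r with
  | nil => intro seen; simp [pvFirsts, pvDed2]
  | cons x xs ih =>
    intro seen
    simp only [List.reverse_cons, pvDed2_append, pvFirsts]
    by_cases hx : x ∈ seen
    · simp [hx, ih]
    · simp [hx, ih]

theorem pvDed2_nil {α : Type} [DecidableEq α] : ∀ (l : List α), pvDed2 l [] = pvDedupA l := by
  intro l
  induction l with
  | nil => rfl
  | cons x xs ih => simp [pvDed2, pvDedupA, ih]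

theorem pvDedupB_eq {α : Type} [DecidableEq α] [BEq α] [LawfulBEq α] (l : List α) :
    pvDedupB l = pvDedupA l := by
  unfold pvDedupB
  rw [show (PySem.Set.empty : PySem.Set α) = ([] : List α) from rfl,
      pvFirsts_go l.reverse [] []]
  simp only [List.nil_append]
  rw [pvFirsts_rev, List.reverse_reverse, pvDed2_nil]

theorem pvSliceSuffix_len (w : List Char) (i j : Int) (hi : 0 ≤ i) (hj : 2 ≤ j)
    (hij : i + j < (w.length : Int)) :
    (PySem.List.slice w (some (i + j)) none).length + 2 ≤ w.length ∧
      (PySem.List.slice w (some (i + j)) none).length = w.length - (i + j).toNat := by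
  rw [PySem.List.slice_from w (by omega)]
  simp only [List.length_drop]
  refine ⟨?_, trivial⟩
  omega

theorem pvSegA_fuel (lex : List (List Char)) :
    ∀ (f g : Nat) (w : List Char), w.length ≤ f → w.length ≤ g →
      pvSegA lex f w = pvSegA lex g w := by
  intro f
  induction f using Nat.strong_induction_on with
  | _ f IH =>
    intro g w hf hg
    by_cases hw : w.length < 3
    · conv_lhs => rw [pvSegA.eq_def]
      conv_rhs => rw [pvSegA.eq_def]
      simp [hw]
    · obtain ⟨f', rfl⟩ : ∃ f', f = f' + 1 := ⟨f - 1, by omega⟩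
      obtain ⟨g', rfl⟩ : ∃ g', g = g' + 1 := ⟨g - 1, by omega⟩
      conv_lhs => rw [pvSegA.eq_def]
      conv_rhs => rw [pvSegA.eq_def]
      simp only [hw, if_false]
      congr 1
      apply PySem.List.foldl_congr_mem
      intro acc i hi
      apply PySem.List.foldl_congr_mem
      intro acc2 j hj
      rw [PySem.List.mem_pyRange_one] at hi hj
      have hlen := pvSliceSuffix_len w i j (by omega) (by omega) (by omega)
      rw [IH f' (by omega) g' (PySem.List.slice w (some (i + j)) none) (by omega) (by omega)]

-- the canonical (fuel = length) value of A's recursion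
def pvCanon (lex : List (List Char)) (w : List Char) : List (List (List Char)) :=
  pvSegA lex w.length w

theorem pvStepB_correct (w : List Char) (lex : List (List Char))
    (k : Nat) (res : List (List (List (List Char))))
    (hk : k ≤ w.length) (hlen : res.length = w.length + 1)
    (hres : ∀ m : Nat, k < m → m ≤ w.length → res[m]? = some (pvCanon lex (w.drop m))) :
    pvStepB w (PySem.Set.ofList lex) res (k : Int) = res.set k (pvCanon lex (w.drop k)) := by
  simp only [pvStepB]
  by_cases hL : (3 : Int) ≤ (w.length : Int) - (k : Int)
  · rw [if_pos hL, PySem.List.pySetD_natCast]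
    congr 1
    obtain ⟨f', hf'⟩ : ∃ f', (w.drop k).length = f' + 1 := ⟨(w.drop k).length - 1, by simp; omega⟩
    have hwk3 : ¬ (w.drop k).length < 3 := by simp; omega
    have hfk : w.length - k = f' + 1 := by simpa using hf'
    conv_rhs => rw [pvCanon, hf', pvSegA.eq_def]
    simp only [hwk3, if_false]
    rw [pvDedupB_eq]
    congr 1
    have hcast : (((w.drop k).length : Nat) : Int) = (w.length : Int) - (k : Int) := by
      simp [Nat.cast_sub hk]
    rw [hcast, PySem.List.slice_from_natCast]
    apply PySem.List.foldl_congr_mem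
    intro acc i hi
    rw [PySem.List.mem_pyRange_one] at hi
    apply PySem.List.foldl_congr_mem
    intro acc2 j hj
    rw [PySem.List.mem_pyRange_one] at hj
    have hpiece : PySem.List.slice w (some ((k : Int) + i)) (some ((k : Int) + i + j)) =
        PySem.List.slice (w.drop k) (some i) (some (i + j)) := by
      rw [PySem.List.slice_toNat _ (by omega) (by omega),
          PySem.List.slice_toNat _ (by omega) (by omega), List.drop_drop]
      rw [show ((k : Int) + i + j).toNat - ((k : Int) + i).toNat = (i + j).toNat - i.toNat by omega]
      rw [show ((k : Int) + i).toNat = k + i.toNat by omega]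
    have hhead : PySem.List.slice w (some (k : Int)) (some ((k : Int) + i)) =
        PySem.List.slice (w.drop k) none (some i) := by
      rw [PySem.List.slice_toNat _ (by omega) (by omega),
          PySem.List.slice_to _ (by omega)]
      rw [show ((k : Int) + i).toNat - ((k : Int)).toNat = i.toNat by omega]
      rw [show ((k : Int)).toNat = k by omega]
    have hsufeq : PySem.List.pyGetD res ((k : Int) + i + j) [] =
        pvSegA lex f' (PySem.List.slice (w.drop k) (some (i + j)) none) := by
      have hb : (0 : Int) ≤ (k : Int) + i + j := by omega
      have hlt : (k : Int) + i + j < (res.length : Int) := by rw [hlen]; push_cast; omega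
      rw [PySem.List.pyGetD_eq_getElem _ _ hb hlt]
      have hm := hres ((k : Int) + i + j).toNat (by omega) (by omega)
      rw [List.getElem?_eq_getElem (by omega)] at hm
      rw [Option.some.injEq] at hm
      rw [hm]
      rw [PySem.List.slice_from _ (by omega), List.drop_drop]
      rw [show ((k : Int) + i + j).toNat = k + (i + j).toNat by omega]
      exact pvSegA_fuel lex _ f' _ (le_refl _) (by simp; omega)
    rw [hpiece]
    by_cases hmem : PySem.List.slice (w.drop k) (some i) (some (i + j)) ∈ lex
    · have hc : PySem.Set.contains (PySem.Set.ofList lex)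
          (PySem.List.slice (w.drop k) (some i) (some (i + j))) = true := by
        rw [PySem.Set.contains_iff]; exact (PySem.Set.mem_ofList _ _).mpr hmem
      rw [if_pos hc, if_pos hmem, hsufeq]
      apply PySem.List.foldl_congr_mem
      intro acc3 suf _
      by_cases hi0 : (0 : Int) < i <;> simp [hi0, hhead]
    · have hc : ¬ PySem.Set.contains (PySem.Set.ofList lex)
          (PySem.List.slice (w.drop k) (some i) (some (i + j))) = true := by
        rw [PySem.Set.contains_iff]; exact fun h => hmem ((PySem.Set.mem_ofList _ _).mp h)
      rw [if_neg hc, if_neg hmem]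
  · rw [if_neg hL, PySem.List.pySetD_natCast]
    congr 1
    rw [PySem.List.slice_from_natCast]
    rw [pvCanon, pvSegA.eq_def]
    have h3 : (w.drop k).length < 3 := by simp; omega
    simp only [h3, if_true]

theorem pvLoop (w : List Char) (lex : List (List Char)) :
    ∀ (k : Nat) (res : List (List (List (List Char)))), k ≤ w.length →
      res.length = w.length + 1 →
      (∀ m : Nat, k < m → m ≤ w.length → res[m]? = some (pvCanon lex (w.drop m))) →
      ∀ m : Nat, m ≤ w.length →
        ((PySem.List.pyRange (k : Int) (-1) (-1)).foldl (pvStepB w (PySem.Set.ofList lex)) res)[m]? =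
          some (pvCanon lex (w.drop m)) := by
  intro k
  induction k with
  | zero =>
    intro res hk hlen hres m hm
    rw [PySem.List.pyRange_neg_one_cons (by omega)]
    rw [show ((0 : Nat) : Int) - 1 = -1 by norm_num]
    rw [PySem.List.pyRange_neg_one_eq_nil (by norm_num)]
    simp only [List.foldl_cons, List.foldl_nil]
    rw [pvStepB_correct w lex 0 res (by omega) hlen (fun m h1 h2 => hres m h1 h2)]
    rw [List.getElem?_set]
    by_cases h0 : m = 0
    · subst h0; simp [hlen]
    · rw [if_neg (show ¬(0 = m) by omega)]
      exact hres m (by omega) hm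
  | succ k ih =>
    intro res hk hlen hres m hm
    rw [PySem.List.pyRange_neg_one_cons (by omega)]
    simp only [List.foldl_cons]
    rw [pvStepB_correct w lex (k + 1) res (by omega) hlen (fun m h1 h2 => hres m h1 h2)]
    rw [show ((k + 1 : Nat) : Int) - 1 = ((k : Nat) : Int) by push_cast; ring]
    refine ih _ (by omega) (by simpa using hlen) ?_ m hm
    intro m h1 h2
    rw [List.getElem?_set]
    by_cases hm1 : m = k + 1
    · subst hm1
      rw [if_pos rfl, if_pos (by omega)]
    · rw [if_neg (show ¬(k + 1 = m) by omega)]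
      exact hres m (by omega) h2

theorem pv_main (w : List Char) (lex : List (List Char)) :
    pvSegB w (PySem.Set.ofList lex) = pvSegA lex w.length w := by
  unfold pvSegB
  have h := pvLoop w lex w.length (List.replicate (w.length + 1) [])
    (le_refl _) (by simp) (fun m h1 h2 => absurd h1 (by omega)) 0 (by omega)
  rw [PySem.List.pyGetD_zero, List.getD, h]
  simp [pvCanon]

-- ===== VERDICT (by name: the statement is the Claim_ definition above) =====
theorem segmentWord_spec : Claim_equal_segmentWord := by
  intro word lexicon _
  unfold Spec_segmentWord segmentWord segmentWord_alt
  rw [pv_main]
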